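-- pv_equiv track=rewrite | github.com/lurosenb/superquail | data/acs_helper.py | get_metadata_features
-- ===== SOURCE A (Python) =====
-- def get_metadata_features(f_types=None):
--     """
--     f_type is list of feature types to return
--
--     Note codes:
--         Categorial: 0
--         Large_catgorical: 1 (greater than 10 categories)
--         Ordinal: 2
--         Continuous: 3
--     """
--     feature_metadata = {
--         "AGEP": 2,
--         "ANC": 0,
--         "CIT": 0,
--         "COW": 0,
--         "DEAR": 0,
--         "DEYE": 0,
--         "DIS": 0,
--         "DREM": 0,
--         "ESP": 0,
--         "ESR": 0,
--         "FER": 0,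
--         "JWTR": 1,
--         "MAR": 0,
--         "MIG": 0,
--         "MIL": 0,
--         "NATIVITY": 0,
--         "OCCP": 1,
--         "PINCP": 0,
--         "POBP": 1,
--         "POVPIP": 3,
--         "POWPUMA": 1,
--         "PUMA": 1,
--         "RAC1P": 0,
--         "RELP": 1,
--         "SCHL": 1,
--         "SEX": 0,
--         "ST": 1,
--         "WKHP": 2,
--         "PUBCOV": 0,
--         "JWMNP":0,
--     }
--     if f_types is None:
--         return feature_metadata
--     else:
--         features_to_return = []
--         for f_t in f_types:
--             keys = [k for k, v in feature_metadata.items() if v == f_t]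
--             features_to_return = features_to_return + keys
--         return dict((key, feature_metadata[key]) for key in features_to_return if key in feature_metadata)
-- ===== SOURCE B (Python) =====
-- def get_metadata_features(f_types=None):
--     """
--     f_type is list of feature types to return
--
--     Note codes:
--         Categorial: 0
--         Large_catgorical: 1 (greater than 10 categories)
--         Ordinal: 2
--         Continuous: 3
--     """
--     feature_metadata = {
--         "AGEP": 2,
--         "ANC": 0,
--         "CIT": 0,
--         "COW": 0,
--         "DEAR": 0,
--         "DEYE": 0,
--         "DIS": 0,
--         "DREM": 0,
--         "ESP": 0,
--         "ESR": 0,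
--         "FER": 0,
--         "JWTR": 1,
--         "MAR": 0,
--         "MIG": 0,
--         "MIL": 0,
--         "NATIVITY": 0,
--         "OCCP": 1,
--         "PINCP": 0,
--         "POBP": 1,
--         "POVPIP": 3,
--         "POWPUMA": 1,
--         "PUMA": 1,
--         "RAC1P": 0,
--         "RELP": 1,
--         "SCHL": 1,
--         "SEX": 0,
--         "ST": 1,
--         "WKHP": 2,
--         "PUBCOV": 0,
--         "JWMNP": 0,
--     }
--     if f_types is None:
--         return feature_metadata
--     # reverse index built once: type code -> list of (key, value) pairs in dict order
--     buckets = {}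
--     for k, v in feature_metadata.items():
--         buckets.setdefault(v, []).append((k, v))
--     pairs = []
--     for t in f_types:
--         pairs.extend(buckets.get(t, []))
--     return dict(pairs)
-- ===== Notes on version B (the rewrite author's own statement) =====
-- stated objective: faster
-- what changed: B builds a reverse index (type code -> list of (key,value) pairs) in one pass over the metadata dict and then concatenates bucket lookups per requested type, replacing A's full-dict filtering scan per requested type and its second membership-checked key lookup pass.
import Mathlib
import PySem

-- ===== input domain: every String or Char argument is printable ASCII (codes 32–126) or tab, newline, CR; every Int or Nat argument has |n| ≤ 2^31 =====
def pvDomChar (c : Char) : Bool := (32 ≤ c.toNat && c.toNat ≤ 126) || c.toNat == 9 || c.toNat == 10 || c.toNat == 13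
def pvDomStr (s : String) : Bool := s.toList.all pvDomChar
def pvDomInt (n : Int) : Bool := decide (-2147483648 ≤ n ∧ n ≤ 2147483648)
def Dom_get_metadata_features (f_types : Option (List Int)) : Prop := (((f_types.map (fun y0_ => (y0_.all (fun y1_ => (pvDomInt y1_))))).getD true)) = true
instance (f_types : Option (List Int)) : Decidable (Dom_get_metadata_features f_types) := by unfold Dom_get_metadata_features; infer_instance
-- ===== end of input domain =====

-- B builds a reverse index (type code -> (key,value) pairs) once and concatenates bucket
-- lookups per requested type, instead of A's per-type scan over the whole metadata dict.


-- the dict literal both Pythons start from (same literal in Source A and Source B)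
def pvMetaPairs : List (String × Int) :=
  [("AGEP", 2), ("ANC", 0), ("CIT", 0), ("COW", 0), ("DEAR", 0), ("DEYE", 0),
   ("DIS", 0), ("DREM", 0), ("ESP", 0), ("ESR", 0), ("FER", 0), ("JWTR", 1),
   ("MAR", 0), ("MIG", 0), ("MIL", 0), ("NATIVITY", 0), ("OCCP", 1), ("PINCP", 0),
   ("POBP", 1), ("POVPIP", 3), ("POWPUMA", 1), ("PUMA", 1), ("RAC1P", 0),
   ("RELP", 1), ("SCHL", 1), ("SEX", 0), ("ST", 1), ("WKHP", 2), ("PUBCOV", 0),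
   ("JWMNP", 0)]

def pvMeta : PySem.Dict String Int := PySem.Dict.ofList pvMetaPairs

-- ===== PORT A =====
def get_metadata_features (f_types : Option (List Int)) : List (String × Int) :=
  match f_types with
  | none => pvMeta.items
  | some ts =>
    -- for f_t in f_types: keys = [k for k,v in items if v == f_t]; features_to_return += keys
    let featuresToReturn : List String :=
      ts.foldl (fun acc f_t =>
        acc ++ (pvMeta.items.filter (fun kv => kv.2 == f_t)).map Prod.fst) []
    -- dict((key, feature_metadata[key]) for key in features_to_return if key in feature_metadata)
    (featuresToReturn.foldl (fun d key =>
      if pvMeta.contains key then d.insert key ((pvMeta.get? key).getD 0) else d)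
      PySem.Dict.empty).items

-- ===== PORT B =====
def get_metadata_features_alt (f_types : Option (List Int)) : List (String × Int) :=
  match f_types with
  | none => pvMeta.items
  | some ts =>
    -- buckets.setdefault(v, []).append((k, v))  for each (k, v) in the metadata dict
    let buckets : PySem.Dict Int (List (String × Int)) :=
      pvMeta.items.foldl (fun d p => d.modify p.2 [] (· ++ [p])) PySem.Dict.empty
    -- pairs.extend(buckets.get(t, []))  for each t in f_types
    let pairs : List (String × Int) :=
      ts.foldl (fun acc t => acc ++ buckets.getD t []) []
    -- dict(pairs)
    (pairs.foldl (fun d p => d.insert p.1 p.2) PySem.Dict.empty).items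

-- ===== PRECONDITION & SPEC =====
def Spec_get_metadata_features (f_types : Option (List Int)) (out : List (String × Int)) : Prop := out = get_metadata_features_alt f_types
instance (f_types : Option (List Int)) (out : List (String × Int)) : Decidable (Spec_get_metadata_features f_types out) := by unfold Spec_get_metadata_features; infer_instance

-- ===== CLAIM (what is proved, stated in full; the proofs are below) =====
def Claim_equal_get_metadata_features : Prop := ∀ (f_types : Option (List Int)), Dom_get_metadata_features f_types → Spec_get_metadata_features f_types (get_metadata_features f_types)

-- ===== LEMMAS AND PROOFS =====

theorem pvMeta_nodup : pvMeta.keys.Nodup := by decide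

-- B's bucket lookup returns exactly the metadata pairs with that type code, in dict order
theorem bucket_getD (t : Int) :
    (pvMeta.items.foldl (fun d p => d.modify p.2 [] (· ++ [p])) PySem.Dict.empty).getD t []
      = pvMeta.items.filter (fun kv => kv.2 == t) := by
  have h : pvMeta.items.foldl (fun d p => d.modify p.2 [] (· ++ [p])) PySem.Dict.empty
      = (pvMeta.items.map (fun p => (p.2, p))).foldl
          (fun d q => d.modify q.1 [] (· ++ [q.2])) PySem.Dict.empty := by
    rw [List.foldl_map]
  rw [h, PySem.Dict.getD_foldl_modify_append]
  simp [List.filter_map, Function.comp_def]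

-- A's membership-checked insert of a key present in the metadata equals B's pair insert
theorem final_fold_eq (pairs : List (String × Int))
    (hmem : ∀ p ∈ pairs, p ∈ pvMeta.items) (d : PySem.Dict String Int) :
    (pairs.map Prod.fst).foldl (fun d key =>
        if pvMeta.contains key then d.insert key ((pvMeta.get? key).getD 0) else d) d
      = pairs.foldl (fun d p => d.insert p.1 p.2) d := by
  induction pairs generalizing d with
  | nil => rfl
  | cons p rest ih =>
    have hp : pvMeta.get? p.1 = some p.2 :=
      PySem.Dict.get?_of_mem_items pvMeta (by simpa using hmem p (by simp)) pvMeta_nodup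
    have hc : pvMeta.contains p.1 = true := by
      rw [PySem.Dict.contains_eq_isSome_get?, hp]; rfl
    simp only [List.map_cons, List.foldl_cons, hc, if_pos, hp, Option.getD_some]
    exact ih (fun q hq => hmem q (by simp [hq])) (d.insert p.1 p.2)

-- the two loops over f_types keep featuresToReturn = pairs.map fst with pairs ⊆ metadata
theorem loops_eq (ts : List Int) (pairs : List (String × Int))
    (hmem : ∀ p ∈ pairs, p ∈ pvMeta.items) :
    (ts.foldl (fun acc f_t =>
        acc ++ (pvMeta.items.filter (fun kv => kv.2 == f_t)).map Prod.fst) (pairs.map Prod.fst)).foldl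
      (fun d key => if pvMeta.contains key then d.insert key ((pvMeta.get? key).getD 0) else d)
      PySem.Dict.empty
    = (ts.foldl (fun acc t =>
        acc ++ (pvMeta.items.foldl (fun d p => d.modify p.2 [] (· ++ [p])) PySem.Dict.empty).getD t [])
        pairs).foldl (fun d p => d.insert p.1 p.2) PySem.Dict.empty := by
  induction ts generalizing pairs with
  | nil => exact final_fold_eq pairs hmem PySem.Dict.empty
  | cons t rest ih =>
    simp only [List.foldl_cons]
    rw [bucket_getD, ← List.map_append]
    refine ih (pairs ++ pvMeta.items.filter (fun kv => kv.2 == t)) ?_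
    intro q hq
    rcases List.mem_append.mp hq with h | h
    · exact hmem q h
    · exact List.mem_of_mem_filter h

-- ===== VERDICT (by name: the statement is the Claim_ definition above) =====
theorem get_metadata_features_spec : Claim_equal_get_metadata_features := by
  intro f_types _
  unfold Spec_get_metadata_features get_metadata_features get_metadata_features_alt
  match f_types with
  | none => rfl
  | some ts =>
    simp only []
    have := loops_eq ts [] (by simp)
    simp only [List.map_nil] at this
    rw [this]
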